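/- CARRIED OVER by tools/port_base_units.py (renaming only) from proofs.vorbis/Vorbis/Spec/Units, GENERATED there by farm/mkstatement.py from design/units.tsv (unit `arena_unpoison`) and the Specs of Vorbis/Spec/*.lean — do not edit.
   THE STATEMENT of the proof unit `arena_unpoison`: the function `arena_unpoison` (11 instructions) satisfies its contract,
   given the contracts of its callees. What the names mean: Vorbis/Spec/Basic.lean. The theorem to prove:
   `theorem arena_unpoison_ok : ProgX.Base.Spec.arena_unpoison.Statement`. -/
import ProgX.Base.Spec.Runtime
namespace ProgX.Base.Spec.arena_unpoison
open X86 X86.User Asan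

/-- The statement of unit `arena_unpoison`. -/
def Statement : Prop :=
  ∀ (Lay : Layout) (_hLay : Lay.hi = 0x1000000) (μ : Microarch) (_hμ : UserX.MicroOK μ) (u₀ : State)
    (_hcode : HasCodeNat Lay u₀ ProgX.Base.L.arena_unpoison.entry ProgX.Base.Code.code_arena_unpoison.nat ProgX.Base.L.arena_unpoison.size),
    Calls Lay μ ProgX.Base.WayInv (ProgX.Base.conv u₀) ProgX.Base.L.arena_unpoison.entry Asan.arenaUnpoisonSpec

end ProgX.Base.Spec.arena_unpoison
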